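-- pv_equiv track=rewrite | github.com/TessFerrandez/AdventOfCode-Python | 2023/day13.py | get_fold2
-- ===== SOURCE A (Python) =====
-- def is_power_of_2(n):
--     return n != 0 and n & (n - 1) == 0
--
-- def is_one_bit_diff(num1, num2):
--     return is_power_of_2(num1 ^ num2)
--
-- def is_match_with_smudge(nums, low, high):
--     smudges = 0
--     while low < high:
--         if nums[low] != nums[high]:
--             if smudges == 0 and is_one_bit_diff(nums[low], nums[high]):
--                 smudges += 1
--             else:
--                 return False
--         low += 1
--         high -= 1
--     return smudges == 1
--
-- def get_fold2(nums):
--     n = len(nums)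
--     half = n // 2
--
--     folds = 0
--
--     for i in range(half):
--         # from front -- ex 0|1 01|23 012|345 ...
--         if is_match_with_smudge(nums, 0, 2 * i + 1):
--             folds += i + 1
--         # from back -- ex 7|8 56|78 345|678 ... if 8 items
--         if is_match_with_smudge(nums, n - 2 - 2 * i, n - 1):
--             folds += n - 1 - i
--
--     return folds
-- ===== SOURCE B (Python) =====
-- def get_fold2(nums):
--     # Tally pass over all mirror pairs grouped by gap: a pair (j, j+d) with odd
--     # gap d belongs to the fold line at p = j + (d+1)//2; count per fold the
--     # mismatching pairs and the one-bit-differing ones, then a fold counts iff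
--     # it has exactly one mismatch and that mismatch is a single flipped bit.
--     n = len(nums)
--     half = n // 2
--     cnt = [0] * n
--     ok = [0] * n
--     for d in range(1, n, 2):
--         h = (d + 1) // 2
--         for j in range(n - d):
--             a, b = nums[j], nums[j + d]
--             if a != b:
--                 p = j + h
--                 cnt[p] += 1
--                 x = a ^ b
--                 if x != 0 and x & (x - 1) == 0:
--                     ok[p] += 1
--     total = 0
--     for p in range(1, half + 1):
--         if cnt[p] == 1 and ok[p] == 1:
--             total += p
--     for p in range(n - half, n):
--         if cnt[p] == 1 and ok[p] == 1:
--             total += p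
--     return total
-- ===== Notes on version B (the rewrite author's own statement) =====
-- stated objective: alternative
-- what changed: Instead of A's per-fold two-pointer mirror scans with an early-exit smudge state machine, B makes one pass over all odd-gap pairs grouped by gap, tallying per fold line a mismatch count and a one-bit-mismatch count into two arrays, then sums the fold positions having exactly one mismatch which is a one-bit mismatch.
import Mathlib
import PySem

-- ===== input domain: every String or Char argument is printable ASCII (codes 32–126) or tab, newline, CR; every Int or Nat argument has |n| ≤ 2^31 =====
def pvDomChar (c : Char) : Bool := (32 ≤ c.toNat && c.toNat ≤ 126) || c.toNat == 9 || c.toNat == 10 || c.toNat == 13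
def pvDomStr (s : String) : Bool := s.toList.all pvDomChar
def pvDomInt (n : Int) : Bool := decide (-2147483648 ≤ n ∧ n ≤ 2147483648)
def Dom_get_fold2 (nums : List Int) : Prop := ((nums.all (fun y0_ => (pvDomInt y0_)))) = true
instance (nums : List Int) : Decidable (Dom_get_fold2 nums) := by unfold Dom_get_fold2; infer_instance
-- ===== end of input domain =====

-- B replaces A's per-fold two-pointer mirror scans (early-exit smudge state machine) by one
-- pass over all odd-gap pairs grouped by gap, tallying per fold line a mismatch count and a
-- one-bit-mismatch count into two arrays, then summing the fold positions having exactly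
-- one mismatch which is a one-bit mismatch;
-- objective: alternative (same asymptotic cost).

-- ===== PORT A =====
def is_power_of_2 (n : Int) : Bool := decide (n ≠ 0) && (PySem.Int.band n (n - 1) == 0)

def is_one_bit_diff (num1 num2 : Int) : Bool := is_power_of_2 (PySem.Int.bxor num1 num2)

-- the while loop of is_match_with_smudge; indices stay in range for every call get_fold2 makes,
-- so nums[low]/nums[high] is pyGetD with an irrelevant default
def imsLoop (nums : List Int) (smudges low high : Int) : Bool :=
  if h : low < high then
    if PySem.List.pyGetD nums low 0 ≠ PySem.List.pyGetD nums high 0 then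
      if smudges == 0 && is_one_bit_diff (PySem.List.pyGetD nums low 0) (PySem.List.pyGetD nums high 0) then
        imsLoop nums (smudges + 1) (low + 1) (high - 1)
      else false
    else imsLoop nums smudges (low + 1) (high - 1)
  else smudges == 1
termination_by (high - low).toNat
decreasing_by all_goals omega

def is_match_with_smudge (nums : List Int) (low high : Int) : Bool :=
  imsLoop nums 0 low high

def get_fold2 (nums : List Int) : Int :=
  let n : Int := nums.length
  let half := PySem.Int.floordiv n 2
  (PySem.List.pyRange 0 half 1).foldl
    (fun folds i =>
      let folds := if is_match_with_smudge nums 0 (2 * i + 1) then folds + (i + 1) else folds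
      if is_match_with_smudge nums (n - 2 - 2 * i) (n - 1) then folds + (n - 1 - i) else folds)
    0

-- ===== PORT B =====
def get_fold2_alt (nums : List Int) : Int :=
  let n : Int := nums.length
  let half := PySem.Int.floordiv n 2
  let st :=
    (PySem.List.pyRange 1 n 2).foldl
      (fun st d =>
        let h := PySem.Int.floordiv (d + 1) 2
        (PySem.List.pyRange 0 (n - d) 1).foldl
          (fun st j =>
            let a := PySem.List.pyGetD nums j 0
            let b := PySem.List.pyGetD nums (j + d) 0
            if a ≠ b then
              let p := j + h
              let cnt := PySem.List.pySetD st.1 p (PySem.List.pyGetD st.1 p 0 + 1)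
              let x := PySem.Int.bxor a b
              let ok :=
                if decide (x ≠ 0) && (PySem.Int.band x (x - 1) == 0) then
                  PySem.List.pySetD st.2 p (PySem.List.pyGetD st.2 p 0 + 1)
                else st.2
              (cnt, ok)
            else st)
          st)
      (List.replicate nums.length (0 : Int), List.replicate nums.length (0 : Int))
  let t1 :=
    (PySem.List.pyRange 1 (half + 1) 1).foldl
      (fun total p =>
        if PySem.List.pyGetD st.1 p 0 == 1 && PySem.List.pyGetD st.2 p 0 == 1 then total + p
        else total) 0
  (PySem.List.pyRange (n - half) n 1).foldl
    (fun total p =>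
      if PySem.List.pyGetD st.1 p 0 == 1 && PySem.List.pyGetD st.2 p 0 == 1 then total + p
      else total) t1

-- ===== PRECONDITION & SPEC =====
def Spec_get_fold2 (nums : List Int) (out : Int) : Prop := out = get_fold2_alt nums
instance (nums : List Int) (out : Int) : Decidable (Spec_get_fold2 nums out) := by unfold Spec_get_fold2; infer_instance

-- ===== CLAIM (what is proved, stated in full; the proofs are below) =====
def Claim_equal_get_fold2 : Prop := ∀ (nums : List Int), Dom_get_fold2 nums → Spec_get_fold2 nums (get_fold2 nums)

-- ===== LEMMAS AND PROOFS =====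

-- value-level tests: mismatch, and mismatch by exactly one bit
def tstM (a b : Int) : Bool := decide (a ≠ b)
def tstK (a b : Int) : Bool := decide (a ≠ b) && is_one_bit_diff a b

-- count over t < w of the test on the mirror pair (nums[p-1-t], nums[p+t]) around center p
def tallyC (nums : List Int) (f : Int → Int → Bool) (p : Int) (w : Nat) : Nat :=
  (List.range w).countP
    (fun t : Nat => f (PySem.List.pyGetD nums (p - 1 - (t : Int)) 0) (PySem.List.pyGetD nums (p + (t : Int)) 0))

-- count over t < T of the test on the valid mirror pairs around center p (what B's arrays hold)
def tallyT (nums : List Int) (f : Int → Int → Bool) (p : Nat) (T : Nat) : Nat :=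
  (List.range T).countP
    (fun t : Nat => decide (t + 1 ≤ p ∧ p + t + 1 ≤ nums.length) &&
      f (PySem.List.pyGetD nums ((p : Int) - 1 - (t : Int)) 0) (PySem.List.pyGetD nums ((p : Int) + (t : Int)) 0))

-- the list of mirror pairs (nums[low+k], nums[high-k]) for k < w
def pairList (nums : List Int) (low high : Int) : Nat → List (Int × Int)
  | 0 => []
  | w + 1 => (PySem.List.pyGetD nums low 0, PySem.List.pyGetD nums high 0) :: pairList nums (low + 1) (high - 1) w

-- A's scan as a fold over the pair list
def pairFold (smudges : Int) : List (Int × Int) → Bool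
  | [] => smudges == 1
  | (a, b) :: ps =>
    if a ≠ b then
      if smudges == 0 && is_one_bit_diff a b then pairFold (smudges + 1) ps else false
    else pairFold smudges ps

theorem imsLoop_eq_pairFold (nums : List Int) (w : Nat) :
    ∀ (s low high : Int), high = low + 2 * (w : Int) - 1 →
      imsLoop nums s low high = pairFold s (pairList nums low high w) := by
  induction w with
  | zero =>
    intro s low high hh
    rw [imsLoop]
    rw [dif_neg (by omega)]
    rfl
  | succ w ih =>
    intro s low high hh
    rw [imsLoop, dif_pos (by push_cast at hh; omega : low < high)]
    show _ = pairFold s (pairList nums low high (w + 1))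
    rw [pairList, pairFold]
    split_ifs with h1 h2
    · exact ih (s + 1) (low + 1) (high - 1) (by push_cast at hh ⊢; omega)
    · rfl
    · exact ih s (low + 1) (high - 1) (by push_cast at hh ⊢; omega)

theorem tstK_le_tstM (q : Int × Int) (h : tstK q.1 q.2 = true) : tstM q.1 q.2 = true := by
  simp [tstK, tstM] at h ⊢; exact h.1

theorem pairFold_one_counts (ps : List (Int × Int)) :
    pairFold 1 ps = decide (ps.countP (fun q => tstM q.1 q.2) = 0) := by
  induction ps with
  | nil => rfl
  | cons q ps ih =>
    obtain ⟨a, b⟩ := q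
    by_cases hab : a = b
    · rw [pairFold, if_neg (by simpa using hab), ih]
      simp [tstM, hab]
    · rw [pairFold, if_pos (by simpa using hab)]
      simp [tstM, hab]

theorem pairFold_zero_counts (ps : List (Int × Int)) :
    pairFold 0 ps = (decide (ps.countP (fun q => tstM q.1 q.2) = 1) &&
      decide (ps.countP (fun q => tstK q.1 q.2) = 1)) := by
  induction ps with
  | nil => rfl
  | cons q ps ih =>
    obtain ⟨a, b⟩ := q
    have hKM : ps.countP (fun q => tstM q.1 q.2) = 0 → ps.countP (fun q => tstK q.1 q.2) = 0 := by
      intro h0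
      have := List.countP_mono_left (l := ps) (p := fun q => tstK q.1 q.2)
        (q := fun q => tstM q.1 q.2) (fun a ha hk => tstK_le_tstM a hk)
      omega
    by_cases hab : a = b
    · have hM : tstM a b = false := by simp [tstM, hab]
      have hK : tstK a b = false := by simp [tstK, hab]
      rw [pairFold, if_neg (by simpa using hab), ih]
      simp only [List.countP_cons, hM, hK]
      simp
    · have hM : tstM a b = true := by simp [tstM, hab]
      rw [pairFold, if_pos (by simpa using hab)]
      by_cases hob : is_one_bit_diff a b = true
      · have hK : tstK a b = true := by simp [tstK, hab, hob]
        rw [if_pos (by simp [hob]), show (0 : Int) + 1 = 1 from rfl, pairFold_one_counts]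
        simp only [List.countP_cons, hM, hK, if_true]
        rcases Nat.eq_zero_or_pos (ps.countP (fun q => tstM q.1 q.2)) with h0 | h0
        · simp [h0, hKM h0]
        · have h1 : ps.countP (fun q => tstM q.1 q.2) + 1 ≠ 1 := by omega
          have h2 : ps.countP (fun q => tstM q.1 q.2) ≠ 0 := by omega
          simp [h2]
      · have hK : tstK a b = false := by simp [tstK, hob]
        rw [if_neg (by simp [hob])]
        simp only [List.countP_cons, hM, hK, if_true]
        rcases Nat.eq_zero_or_pos (ps.countP (fun q => tstM q.1 q.2)) with h0 | h0
        · simp [h0, hKM h0]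
        · have h1 : ps.countP (fun q => tstM q.1 q.2) + 1 ≠ 1 := by omega
          simp only [h1, decide_false, Bool.false_and, Bool.false_eq]

theorem countP_pairList (nums : List Int) (f : Int → Int → Bool) (w : Nat) :
    ∀ (low high : Int),
      (pairList nums low high w).countP (fun q => f q.1 q.2) =
        (List.range w).countP
          (fun k : Nat => f (PySem.List.pyGetD nums (low + (k : Int)) 0) (PySem.List.pyGetD nums (high - (k : Int)) 0)) := by
  induction w with
  | zero => intro low high; rfl
  | succ w ih =>
    intro low high
    have hr : (List.range (w + 1)).countP
        (fun k : Nat => f (PySem.List.pyGetD nums (low + (k : Int)) 0) (PySem.List.pyGetD nums (high - (k : Int)) 0)) =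
        (if f (PySem.List.pyGetD nums low 0) (PySem.List.pyGetD nums high 0) then 1 else 0) +
          (List.range w).countP
            (fun k : Nat => f (PySem.List.pyGetD nums (low + 1 + (k : Int)) 0) (PySem.List.pyGetD nums (high - 1 - (k : Int)) 0)) := by
      rw [List.range_succ_eq_map, List.countP_cons, List.countP_map]
      have : ((fun k : Nat => f (PySem.List.pyGetD nums (low + (k : Int)) 0)
            (PySem.List.pyGetD nums (high - (k : Int)) 0)) ∘ Nat.succ) =
          (fun k : Nat => f (PySem.List.pyGetD nums (low + 1 + (k : Int)) 0)
            (PySem.List.pyGetD nums (high - 1 - (k : Int)) 0)) := by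
        funext a
        have e1 : low + ((a.succ : Nat) : Int) = low + 1 + (a : Int) := by push_cast; ring
        have e2 : high - ((a.succ : Nat) : Int) = high - 1 - (a : Int) := by push_cast; ring
        simp only [Function.comp, e1, e2]
      rw [this]
      simp [Nat.add_comm]
    rw [hr, pairList, List.countP_cons, ih (low + 1) (high - 1)]
    simp [Nat.add_comm]

theorem countP_range_reflect (w : Nat) (g : Nat → Bool) :
    (List.range w).countP g = (List.range w).countP (fun k => g (w - 1 - k)) := by
  conv_lhs => rw [← List.countP_reverse, List.range_eq_range', List.reverse_range', List.countP_map]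
  exact List.countP_congr (fun a _ => by simp)

theorem countP_pairList_tallyC (nums : List Int) (f : Int → Int → Bool) (w : Nat) (low : Int) :
    (pairList nums low (low + 2 * (w : Int) - 1) w).countP (fun q => f q.1 q.2) =
      tallyC nums f (low + w) w := by
  rw [countP_pairList, tallyC, countP_range_reflect]
  refine List.countP_congr (fun k hk => ?_)
  rw [List.mem_range] at hk
  have e1 : low + ((w - 1 - k : Nat) : Int) = low + (w : Int) - 1 - (k : Int) := by
    have : ((w - 1 - k : Nat) : Int) = (w : Int) - 1 - (k : Int) := by omega
    omega
  have e2 : low + 2 * (w : Int) - 1 - ((w - 1 - k : Nat) : Int) = low + (w : Int) + (k : Int) := by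
    have : ((w - 1 - k : Nat) : Int) = (w : Int) - 1 - (k : Int) := by omega
    omega
  rw [e1, e2]

theorem is_match_eq_tallyC (nums : List Int) (w : Nat) (low : Int) :
    is_match_with_smudge nums low (low + 2 * (w : Int) - 1) =
      (decide (tallyC nums tstM (low + w) w = 1) && decide (tallyC nums tstK (low + w) w = 1)) := by
  rw [is_match_with_smudge, imsLoop_eq_pairFold nums w 0 low _ rfl, pairFold_zero_counts,
    countP_pairList_tallyC, countP_pairList_tallyC]

theorem countP_range_band (w d : Nat) (g : Nat → Bool) :
    (List.range (w + d)).countP (fun t => decide (t < w) && g t) = (List.range w).countP g := by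
  induction d with
  | zero => exact List.countP_congr (fun a ha => by simp [List.mem_range] at ha; simp [ha])
  | succ d ih =>
    rw [show w + (d + 1) = (w + d) + 1 from rfl, List.range_succ, List.countP_append, ← ih]
    simp

theorem tallyT_eq_tallyC (nums : List Int) (f : Int → Int → Bool) (p w T : Nat)
    (hw : ∀ t : Nat, (t + 1 ≤ p ∧ p + t + 1 ≤ nums.length) ↔ t < w) (hT : w ≤ T) :
    tallyT nums f p T = tallyC nums f (p : Int) w := by
  rw [tallyT, show T = w + (T - w) from by omega]
  have : ((List.range (w + (T - w))).countP
      (fun t => decide (t + 1 ≤ p ∧ p + t + 1 ≤ nums.length) &&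
        f (PySem.List.pyGetD nums ((p : Int) - 1 - t) 0) (PySem.List.pyGetD nums ((p : Int) + t) 0))) =
      ((List.range (w + (T - w))).countP
      (fun t => decide (t < w) &&
        f (PySem.List.pyGetD nums ((p : Int) - 1 - t) 0) (PySem.List.pyGetD nums ((p : Int) + t) 0))) := by
    refine List.countP_congr (fun t _ => ?_)
    have hiff := hw t
    by_cases h : t < w
    · rw [show decide (t + 1 ≤ p ∧ p + t + 1 ≤ nums.length) = true from by simp [hiff.mpr h],
        show decide (t < w) = true from by simp [h]]
    · rw [show decide (t + 1 ≤ p ∧ p + t + 1 ≤ nums.length) = false from by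
          simpa using fun hc => h (hiff.mp hc),
        show decide (t < w) = false from by simp [h]]
  rw [this, countP_range_band]
  rfl

-- ===== B-side loop characterisation =====

-- B's inner-loop step (identical to the lambda in the port of B)
def bstep (nums : List Int) (d h : Int) (st : List Int × List Int) (j : Int) : List Int × List Int :=
  let a := PySem.List.pyGetD nums j 0
  let b := PySem.List.pyGetD nums (j + d) 0
  if a ≠ b then
    let p := j + h
    let cnt := PySem.List.pySetD st.1 p (PySem.List.pyGetD st.1 p 0 + 1)
    let x := PySem.Int.bxor a b
    let ok :=
      if decide (x ≠ 0) && (PySem.Int.band x (x - 1) == 0) then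
        PySem.List.pySetD st.2 p (PySem.List.pyGetD st.2 p 0 + 1)
      else st.2
    (cnt, ok)
  else st

-- one inner pass (gap d = 2t+1) adds the valid mirror pair with that gap to each fold's tallies
theorem inner_spec (nums : List Int) (t : Nat) (d h : Int) (hd : d = 2 * (t : Int) + 1)
    (hh : h = (t : Int) + 1) :
    ∀ (m : Nat) (j0 : Int) (st : List Int × List Int), 0 ≤ j0 →
      m = (((nums.length : Int) - d) - j0).toNat →
      st.1.length = nums.length → st.2.length = nums.length →
      ((PySem.List.pyRange j0 ((nums.length : Int) - d) 1).foldl (bstep nums d h) st).1.length = nums.length ∧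
      ((PySem.List.pyRange j0 ((nums.length : Int) - d) 1).foldl (bstep nums d h) st).2.length = nums.length ∧
      ∀ p : Nat, p < nums.length →
        PySem.List.pyGetD ((PySem.List.pyRange j0 ((nums.length : Int) - d) 1).foldl (bstep nums d h) st).1 (p : Int) 0 =
          PySem.List.pyGetD st.1 (p : Int) 0 +
            (if j0 ≤ (p : Int) - ((t : Int) + 1) ∧ (p : Int) + (t : Int) + 1 ≤ (nums.length : Int) ∧
                tstM (PySem.List.pyGetD nums ((p : Int) - 1 - (t : Int)) 0) (PySem.List.pyGetD nums ((p : Int) + (t : Int)) 0) = true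
              then 1 else 0) ∧
        PySem.List.pyGetD ((PySem.List.pyRange j0 ((nums.length : Int) - d) 1).foldl (bstep nums d h) st).2 (p : Int) 0 =
          PySem.List.pyGetD st.2 (p : Int) 0 +
            (if j0 ≤ (p : Int) - ((t : Int) + 1) ∧ (p : Int) + (t : Int) + 1 ≤ (nums.length : Int) ∧
                tstK (PySem.List.pyGetD nums ((p : Int) - 1 - (t : Int)) 0) (PySem.List.pyGetD nums ((p : Int) + (t : Int)) 0) = true
              then 1 else 0) := by
  intro m
  induction m with
  | zero =>
    intro j0 st hj0 hm h1 h2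
    rw [PySem.List.pyRange_one_eq_nil (by omega), List.foldl_nil]
    refine ⟨h1, h2, fun p hp => ⟨?_, ?_⟩⟩ <;>
      · rw [if_neg (fun hc => by omega)]
        omega
  | succ m ih =>
    intro j0 st hj0 hm h1 h2
    have hlt : j0 < (nums.length : Int) - d := by omega
    rw [PySem.List.pyRange_one_cons hlt, List.foldl_cons]
    have hq : (j0 + h) = (((j0 + h).toNat : Nat) : Int) := by omega
    have hqlt1 : (j0 + h).toNat < st.1.length := by omega
    have hqlt2 : (j0 + h).toNat < st.2.length := by omega
    have hl1 : (bstep nums d h st j0).1.length = nums.length := by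
      simp only [bstep]
      split_ifs <;> simp [PySem.List.length_pySetD, h1]
    have hl2 : (bstep nums d h st j0).2.length = nums.length := by
      simp only [bstep]
      split_ifs <;> simp [PySem.List.length_pySetD, h2]
    obtain ⟨g1, g2, g3⟩ := ih (j0 + 1) (bstep nums d h st j0) (by omega) (by omega) hl1 hl2
    refine ⟨g1, g2, fun p hp => ?_⟩
    obtain ⟨e1, e2⟩ := g3 p hp
    have hsh1 : (p : Int) - 1 - (t : Int) = j0 ↔ (p : Int) = j0 + h := by omega
    have hind_shift : ∀ (f : Int → Int → Bool), (p : Int) ≠ j0 + h →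
        (if j0 + 1 ≤ (p : Int) - ((t : Int) + 1) ∧ (p : Int) + (t : Int) + 1 ≤ (nums.length : Int) ∧
            f (PySem.List.pyGetD nums ((p : Int) - 1 - (t : Int)) 0) (PySem.List.pyGetD nums ((p : Int) + (t : Int)) 0) = true
          then (1 : Int) else 0) =
        (if j0 ≤ (p : Int) - ((t : Int) + 1) ∧ (p : Int) + (t : Int) + 1 ≤ (nums.length : Int) ∧
            f (PySem.List.pyGetD nums ((p : Int) - 1 - (t : Int)) 0) (PySem.List.pyGetD nums ((p : Int) + (t : Int)) 0) = true
          then (1 : Int) else 0) := by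
      intro f hne
      by_cases hcond : j0 ≤ (p : Int) - ((t : Int) + 1) ∧ (p : Int) + (t : Int) + 1 ≤ (nums.length : Int) ∧
          f (PySem.List.pyGetD nums ((p : Int) - 1 - (t : Int)) 0) (PySem.List.pyGetD nums ((p : Int) + (t : Int)) 0) = true
      · rw [if_pos ⟨by omega, hcond.2⟩, if_pos hcond]
      · rw [if_neg (fun hc => hcond ⟨by omega, hc.2⟩), if_neg hcond]
    have hind_one : ∀ (f : Int → Int → Bool), (p : Int) = j0 + h →
        f (PySem.List.pyGetD nums j0 0) (PySem.List.pyGetD nums (j0 + d) 0) = true →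
        (if j0 ≤ (p : Int) - ((t : Int) + 1) ∧ (p : Int) + (t : Int) + 1 ≤ (nums.length : Int) ∧
            f (PySem.List.pyGetD nums ((p : Int) - 1 - (t : Int)) 0) (PySem.List.pyGetD nums ((p : Int) + (t : Int)) 0) = true
          then (1 : Int) else 0) = 1 := by
      intro f hpq hf
      rw [if_pos ⟨by omega, by omega, by
        rw [show (p : Int) - 1 - (t : Int) = j0 from by omega,
          show (p : Int) + (t : Int) = j0 + d from by omega]
        exact hf⟩]
    have hind_zero : ∀ (f : Int → Int → Bool), (p : Int) = j0 + h →
        f (PySem.List.pyGetD nums j0 0) (PySem.List.pyGetD nums (j0 + d) 0) = false →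
        (if j0 ≤ (p : Int) - ((t : Int) + 1) ∧ (p : Int) + (t : Int) + 1 ≤ (nums.length : Int) ∧
            f (PySem.List.pyGetD nums ((p : Int) - 1 - (t : Int)) 0) (PySem.List.pyGetD nums ((p : Int) + (t : Int)) 0) = true
          then (1 : Int) else 0) = 0 := by
      intro f hpq hf
      rw [if_neg]
      intro hc
      rw [show (p : Int) - 1 - (t : Int) = j0 from by omega,
        show (p : Int) + (t : Int) = j0 + d from by omega, hf] at hc
      exact absurd hc.2.2 (by simp)
    by_cases hab : PySem.List.pyGetD nums j0 0 ≠ PySem.List.pyGetD nums (j0 + d) 0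
    · have hb1 : (bstep nums d h st j0).1 =
          PySem.List.pySetD st.1 (j0 + h) (PySem.List.pyGetD st.1 (j0 + h) 0 + 1) := by
        simp only [bstep]
        rw [if_pos (by simpa using hab)]
      have hb2 : (bstep nums d h st j0).2 =
          if is_one_bit_diff (PySem.List.pyGetD nums j0 0) (PySem.List.pyGetD nums (j0 + d) 0) then
            PySem.List.pySetD st.2 (j0 + h) (PySem.List.pyGetD st.2 (j0 + h) 0 + 1)
          else st.2 := by
        simp only [bstep, is_one_bit_diff, is_power_of_2]
        rw [if_pos (by simpa using hab)]
        rfl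
      have hM : tstM (PySem.List.pyGetD nums j0 0) (PySem.List.pyGetD nums (j0 + d) 0) = true := by
        simpa [tstM] using hab
      constructor
      · rw [e1, hb1, hq, PySem.List.pyGetD_pySetD_natCast st.1 _ p _ 0 hqlt1]
        by_cases hpq : (p : Int) = j0 + h
        · rw [if_pos (by omega), hind_one tstM hpq hM,
            if_neg (fun hc => by omega : ¬ (j0 + 1 ≤ (p : Int) - ((t : Int) + 1) ∧ (p : Int) + (t : Int) + 1 ≤ (nums.length : Int) ∧
              tstM (PySem.List.pyGetD nums ((p : Int) - 1 - (t : Int)) 0) (PySem.List.pyGetD nums ((p : Int) + (t : Int)) 0) = true)),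
            ← hq, ← hpq]
          ring
        · rw [if_neg (by omega), hind_shift tstM hpq]
      · rw [e2, hb2]
        by_cases hob : is_one_bit_diff (PySem.List.pyGetD nums j0 0) (PySem.List.pyGetD nums (j0 + d) 0) = true
        · have hK : tstK (PySem.List.pyGetD nums j0 0) (PySem.List.pyGetD nums (j0 + d) 0) = true := by
            have hM' : ¬ PySem.List.pyGetD nums j0 0 = PySem.List.pyGetD nums (j0 + d) 0 := by
              simpa [tstM] using hM
            simp [tstK, hob, hM']
          rw [if_pos hob, hq, PySem.List.pyGetD_pySetD_natCast st.2 _ p _ 0 hqlt2]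
          by_cases hpq : (p : Int) = j0 + h
          · rw [if_pos (by omega), hind_one tstK hpq hK,
              if_neg (fun hc => by omega : ¬ (j0 + 1 ≤ (p : Int) - ((t : Int) + 1) ∧ (p : Int) + (t : Int) + 1 ≤ (nums.length : Int) ∧
                tstK (PySem.List.pyGetD nums ((p : Int) - 1 - (t : Int)) 0) (PySem.List.pyGetD nums ((p : Int) + (t : Int)) 0) = true)),
              ← hq, ← hpq]
            ring
          · rw [if_neg (by omega), hind_shift tstK hpq]
        · have hK : tstK (PySem.List.pyGetD nums j0 0) (PySem.List.pyGetD nums (j0 + d) 0) = false := by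
            simp [tstK, Bool.eq_false_iff.mpr hob]
          rw [if_neg hob]
          by_cases hpq : (p : Int) = j0 + h
          · rw [hind_zero tstK hpq hK,
              if_neg (fun hc => by
                rw [show (p : Int) - 1 - (t : Int) = j0 from by omega,
                  show (p : Int) + (t : Int) = j0 + d from by omega, hK] at hc
                exact absurd hc.2.2 (by simp))]
          · rw [hind_shift tstK hpq]
    · have hb : bstep nums d h st j0 = st := by
        simp only [bstep]
        rw [if_neg (by simpa using hab)]
      have hM : tstM (PySem.List.pyGetD nums j0 0) (PySem.List.pyGetD nums (j0 + d) 0) = false := by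
        simp [tstM]
        omega
      have hK : tstK (PySem.List.pyGetD nums j0 0) (PySem.List.pyGetD nums (j0 + d) 0) = false := by
        simp [tstK]
        intro hne
        exact absurd hne (by simpa using hab)
      constructor
      · rw [e1, hb]
        by_cases hpq : (p : Int) = j0 + h
        · rw [hind_zero tstM hpq hM,
            if_neg (fun hc => by
              rw [show (p : Int) - 1 - (t : Int) = j0 from by omega,
                show (p : Int) + (t : Int) = j0 + d from by omega, hM] at hc
              exact absurd hc.2.2 (by simp))]
        · rw [hind_shift tstM hpq]
      · rw [e2, hb]
        by_cases hpq : (p : Int) = j0 + h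
        · rw [hind_zero tstK hpq hK,
            if_neg (fun hc => by
              rw [show (p : Int) - 1 - (t : Int) = j0 from by omega,
                show (p : Int) + (t : Int) = j0 + d from by omega, hK] at hc
              exact absurd hc.2.2 (by simp))]
        · rw [hind_shift tstK hpq]

-- B's outer-loop step (identical to the lambda in the port of B)
def ostep (nums : List Int) (st : List Int × List Int) (d : Int) : List Int × List Int :=
  (PySem.List.pyRange 0 ((nums.length : Int) - d) 1).foldl
    (bstep nums d (PySem.Int.floordiv (d + 1) 2)) st

-- the per-fold conditions of the two programs
def goodA (nums : List Int) (p : Int) (w : Nat) : Bool :=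
  decide (tallyC nums tstM p w = 1) && decide (tallyC nums tstK p w = 1)

def goodB (nums : List Int) (p : Nat) : Bool :=
  decide (tallyT nums tstM p (nums.length / 2) = 1) && decide (tallyT nums tstK p (nums.length / 2) = 1)

theorem tallyT_succ (nums : List Int) (f : Int → Int → Bool) (p T : Nat) :
    tallyT nums f p (T + 1) = tallyT nums f p T +
      (if (decide (T + 1 ≤ p ∧ p + T + 1 ≤ nums.length) &&
          f (PySem.List.pyGetD nums ((p : Int) - 1 - (T : Int)) 0) (PySem.List.pyGetD nums ((p : Int) + (T : Int)) 0)) = true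
        then 1 else 0) := by
  rw [tallyT, tallyT, List.range_succ, List.countP_append]
  simp [List.countP_cons]

theorem outer_spec (nums : List Int) (T : Nat) :
    (((List.range T).map (fun k : Nat => (1 : Int) + 2 * (k : Int))).foldl (ostep nums)
        (List.replicate nums.length (0 : Int), List.replicate nums.length (0 : Int))).1.length = nums.length ∧
    (((List.range T).map (fun k : Nat => (1 : Int) + 2 * (k : Int))).foldl (ostep nums)
        (List.replicate nums.length (0 : Int), List.replicate nums.length (0 : Int))).2.length = nums.length ∧
    ∀ p : Nat, p < nums.length →
      PySem.List.pyGetD ((((List.range T).map (fun k : Nat => (1 : Int) + 2 * (k : Int))).foldl (ostep nums)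
          (List.replicate nums.length (0 : Int), List.replicate nums.length (0 : Int)))).1 (p : Int) 0 =
        (tallyT nums tstM p T : Int) ∧
      PySem.List.pyGetD ((((List.range T).map (fun k : Nat => (1 : Int) + 2 * (k : Int))).foldl (ostep nums)
          (List.replicate nums.length (0 : Int), List.replicate nums.length (0 : Int)))).2 (p : Int) 0 =
        (tallyT nums tstK p T : Int) := by
  induction T with
  | zero =>
    refine ⟨by simp, by simp, fun p hp => ?_⟩
    constructor <;>
      · rw [PySem.List.pyGetD_natCast]
        simp [List.getD, hp]
  | succ T ihT =>
    obtain ⟨ih1, ih2, ihg⟩ := ihT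
    rw [List.range_succ, List.map_append, List.foldl_append, List.map_singleton,
      List.foldl_cons, List.foldl_nil]
    have hfd : PySem.Int.floordiv ((1 + 2 * (T : Int)) + 1) 2 = (T : Int) + 1 := by
      rw [PySem.Int.floordiv_eq_ediv_of_pos (by norm_num)]
      omega
    obtain ⟨s1, s2, sg⟩ := inner_spec nums T (1 + 2 * (T : Int))
      (PySem.Int.floordiv ((1 + 2 * (T : Int)) + 1) 2) (by ring) hfd
      ((((nums.length : Int) - (1 + 2 * (T : Int))) - 0).toNat) 0 _ le_rfl rfl ih1 ih2
    simp only [ostep]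
    refine ⟨s1, s2, fun p hp => ?_⟩
    obtain ⟨q1, q2⟩ := sg p hp
    rw [q1, q2, (ihg p hp).1, (ihg p hp).2]
    constructor
    · rw [tallyT_succ]
      by_cases hN : T + 1 ≤ p ∧ p + T + 1 ≤ nums.length
      · by_cases hBt : tstM (PySem.List.pyGetD nums ((p : Int) - 1 - (T : Int)) 0)
            (PySem.List.pyGetD nums ((p : Int) + (T : Int)) 0) = true
        · rw [if_pos ⟨by omega, by omega, hBt⟩, if_pos (by simp [hN, hBt])]
          push_cast
          ring
        · rw [if_neg (fun hc => hBt hc.2.2), if_neg (by simp [hBt])]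
          push_cast
          ring
      · rw [if_neg (fun hc => by
            rcases hc with ⟨h1, h2, _⟩
            exact hN ⟨by omega, by omega⟩), if_neg (fun hc => by
            rw [Bool.and_eq_true] at hc
            exact hN (by simpa using hc.1))]
        push_cast
        ring
    · rw [tallyT_succ]
      by_cases hN : T + 1 ≤ p ∧ p + T + 1 ≤ nums.length
      · by_cases hBt : tstK (PySem.List.pyGetD nums ((p : Int) - 1 - (T : Int)) 0)
            (PySem.List.pyGetD nums ((p : Int) + (T : Int)) 0) = true
        · rw [if_pos ⟨by omega, by omega, hBt⟩, if_pos (by simp [hN, hBt])]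
          push_cast
          ring
        · rw [if_neg (fun hc => hBt hc.2.2), if_neg (by simp [hBt])]
          push_cast
          ring
      · rw [if_neg (fun hc => by
            rcases hc with ⟨h1, h2, _⟩
            exact hN ⟨by omega, by omega⟩), if_neg (fun hc => by
            rw [Bool.and_eq_true] at hc
            exact hN (by simpa using hc.1))]
        push_cast
        ring

theorem sum_range_reflect_int (m : Nat) (f : Nat → Int) :
    ((List.range m).map f).sum = ((List.range m).map (fun k => f (m - 1 - k))).sum := by
  conv_lhs => rw [← List.sum_reverse, ← List.map_reverse, List.range_eq_range', List.reverse_range']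
  rw [List.map_map]
  exact congrArg _ (List.map_congr_left (fun a _ => by simp))

theorem hhalf (nums : List Int) :
    PySem.Int.floordiv ((nums.length : Int)) 2 = ((nums.length / 2 : Nat) : Int) := by
  exact_mod_cast PySem.Int.floordiv_natCast nums.length 2

theorem natcast_beq_one (a : Nat) : ((a : Int) == (1 : Int)) = decide (a = 1) := by
  by_cases h : a = 1
  · simp [h]
  · simp [h, Nat.cast_eq_one]

theorem A_sum (nums : List Int) :
    get_fold2 nums =
      ((List.range (nums.length / 2)).map
        (fun k : Nat => if goodA nums ((k : Int) + 1) (k + 1) = true then (k : Int) + 1 else 0)).sum +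
      ((List.range (nums.length / 2)).map
        (fun k : Nat => if goodA nums ((nums.length : Int) - 1 - (k : Int)) (k + 1) = true
          then (nums.length : Int) - 1 - (k : Int) else 0)).sum := by
  simp only [get_fold2]
  have hcg : (PySem.List.pyRange 0 (PySem.Int.floordiv ((nums.length : Int)) 2) 1).foldl
      (fun folds i =>
        if is_match_with_smudge nums ((nums.length : Int) - 2 - 2 * i) ((nums.length : Int) - 1) = true then
          (if is_match_with_smudge nums 0 (2 * i + 1) = true then folds + (i + 1) else folds) + ((nums.length : Int) - 1 - i)
        else if is_match_with_smudge nums 0 (2 * i + 1) = true then folds + (i + 1) else folds) 0 =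
      (PySem.List.pyRange 0 (PySem.Int.floordiv ((nums.length : Int)) 2) 1).foldl
      (fun folds i => folds +
        ((if is_match_with_smudge nums 0 (2 * i + 1) then i + 1 else 0) +
         (if is_match_with_smudge nums ((nums.length : Int) - 2 - 2 * i) ((nums.length : Int) - 1)
          then (nums.length : Int) - 1 - i else 0))) 0 := by
    refine PySem.List.foldl_congr_mem _ _ _ _ ?_
    intro acc x hx
    split_ifs <;> ring
  rw [hcg]
  rw [PySem.List.foldl_add, hhalf, PySem.List.pyRange_one, List.map_map, zero_add]
  rw [show ((((nums.length / 2 : Nat)) : Int) - 0).toNat = nums.length / 2 from by omega]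
  simp only [Function.comp_def, zero_add]
  rw [PySem.List.sum_map_add_int]
  congr 1
  · refine congrArg _ (List.map_congr_left (fun k hk => ?_))
    rw [show 2 * (k : Int) + 1 = 0 + 2 * ((k + 1 : Nat) : Int) - 1 from by push_cast; ring,
      is_match_eq_tallyC nums (k + 1) 0,
      show (0 : Int) + ((k + 1 : Nat) : Int) = (k : Int) + 1 from by push_cast; ring]
    rfl
  · refine congrArg _ (List.map_congr_left (fun k hk => ?_))
    have hm := is_match_eq_tallyC nums (k + 1) ((nums.length : Int) - 2 - 2 * (k : Int))
    rw [show ((nums.length : Int) - 2 - 2 * (k : Int)) + 2 * ((k + 1 : Nat) : Int) - 1 = (nums.length : Int) - 1 from by push_cast; ring,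
      show ((nums.length : Int) - 2 - 2 * (k : Int)) + ((k + 1 : Nat) : Int) = (nums.length : Int) - 1 - (k : Int) from by push_cast; ring] at hm
    rw [hm]
    rfl

theorem B_sum (nums : List Int) :
    get_fold2_alt nums =
      ((List.range (nums.length / 2)).map
        (fun k : Nat => if goodB nums (k + 1) = true then (k : Int) + 1 else 0)).sum +
      ((List.range (nums.length / 2)).map
        (fun k : Nat => if goodB nums (nums.length - nums.length / 2 + k) = true
          then ((nums.length - nums.length / 2 + k : Nat) : Int) else 0)).sum := by
  obtain ⟨L1, L2, HG⟩ := outer_spec nums (nums.length / 2)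
  simp only [get_fold2_alt]
  have hout : PySem.List.pyRange 1 (nums.length : Int) 2 =
      (List.range (nums.length / 2)).map (fun k : Nat => (1 : Int) + 2 * (k : Int)) := by
    rw [PySem.List.pyRange_of_pos _ _ (by norm_num : (0 : Int) < 2)]
    have : (if (1 : Int) < (nums.length : Int) then (((nums.length : Int) - 1 + 2 - 1) / 2).toNat else 0) =
        nums.length / 2 := by
      split_ifs with h1 <;> omega
    rw [this]
  have hO : (fun (st : List Int × List Int) (d : Int) =>
      (PySem.List.pyRange 0 ((nums.length : Int) - d) 1).foldl
        (fun st j =>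
          let a := PySem.List.pyGetD nums j 0
          let b := PySem.List.pyGetD nums (j + d) 0
          if a ≠ b then
            let p := j + PySem.Int.floordiv (d + 1) 2
            let cnt := PySem.List.pySetD st.1 p (PySem.List.pyGetD st.1 p 0 + 1)
            let x := PySem.Int.bxor a b
            let ok :=
              if decide (x ≠ 0) && (PySem.Int.band x (x - 1) == 0) then
                PySem.List.pySetD st.2 p (PySem.List.pyGetD st.2 p 0 + 1)
              else st.2
            (cnt, ok)
          else st)
        st) = ostep nums := rfl
  rw [hout, hO, hhalf]
  have hcg : ∀ (a b : Int) (init : Int), (PySem.List.pyRange a b 1).foldl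
      (fun total p =>
        if (PySem.List.pyGetD (((List.range (nums.length / 2)).map (fun k : Nat => (1 : Int) + 2 * (k : Int))).foldl (ostep nums)
            (List.replicate nums.length (0 : Int), List.replicate nums.length (0 : Int))).1 p 0 == 1 &&
          PySem.List.pyGetD (((List.range (nums.length / 2)).map (fun k : Nat => (1 : Int) + 2 * (k : Int))).foldl (ostep nums)
            (List.replicate nums.length (0 : Int), List.replicate nums.length (0 : Int))).2 p 0 == 1) = true
        then total + p else total) init =
      (PySem.List.pyRange a b 1).foldl
      (fun total p => total +
        (if (PySem.List.pyGetD (((List.range (nums.length / 2)).map (fun k : Nat => (1 : Int) + 2 * (k : Int))).foldl (ostep nums)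
            (List.replicate nums.length (0 : Int), List.replicate nums.length (0 : Int))).1 p 0 == 1 &&
          PySem.List.pyGetD (((List.range (nums.length / 2)).map (fun k : Nat => (1 : Int) + 2 * (k : Int))).foldl (ostep nums)
            (List.replicate nums.length (0 : Int), List.replicate nums.length (0 : Int))).2 p 0 == 1) = true then p else 0)) init := by
    intro a b init
    refine PySem.List.foldl_congr_mem _ _ _ _ ?_
    intro acc x hx
    split_ifs <;> ring
  rw [hcg, hcg]
  rw [PySem.List.foldl_add, PySem.List.foldl_add, zero_add]
  congr 1
  · rw [PySem.List.pyRange_one, List.map_map]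
    rw [show ((((nums.length / 2 : Nat) : Int) + 1) - 1).toNat = nums.length / 2 from by omega]
    refine congrArg _ (List.map_congr_left (fun k hk => ?_))
    rw [List.mem_range] at hk
    simp only [Function.comp_def]
    have hb : k + 1 < nums.length := by omega
    rw [show (1 : Int) + (k : Int) = ((k + 1 : Nat) : Int) from by push_cast; ring,
      (HG (k + 1) hb).1, (HG (k + 1) hb).2]
    rw [show ((tallyT nums tstM (k + 1) (nums.length / 2) : Int) == 1 &&
        (tallyT nums tstK (k + 1) (nums.length / 2) : Int) == 1) = goodB nums (k + 1) from by
      rw [goodB, natcast_beq_one, natcast_beq_one]]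
    rw [show ((k + 1 : Nat) : Int) = (k : Int) + 1 from by push_cast; ring]
  · rw [PySem.List.pyRange_one, List.map_map]
    rw [show ((nums.length : Int) - ((nums.length : Int) - ((nums.length / 2 : Nat) : Int))).toNat = nums.length / 2 from by omega]
    refine congrArg _ (List.map_congr_left (fun k hk => ?_))
    rw [List.mem_range] at hk
    simp only [Function.comp_def]
    have hb : nums.length - nums.length / 2 + k < nums.length := by omega
    rw [show (nums.length : Int) - ((nums.length / 2 : Nat) : Int) + (k : Int) =
        ((nums.length - nums.length / 2 + k : Nat) : Int) from by omega,
      (HG (nums.length - nums.length / 2 + k) hb).1, (HG (nums.length - nums.length / 2 + k) hb).2]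
    rw [show ((tallyT nums tstM (nums.length - nums.length / 2 + k) (nums.length / 2) : Int) == 1 &&
        (tallyT nums tstK (nums.length - nums.length / 2 + k) (nums.length / 2) : Int) == 1) =
        goodB nums (nums.length - nums.length / 2 + k) from by
      rw [goodB, natcast_beq_one, natcast_beq_one]]

theorem get_fold2_spec : Claim_equal_get_fold2 := by
  intro nums _
  unfold Spec_get_fold2
  rw [A_sum, B_sum]
  have hfront : ∀ k ∈ List.range (nums.length / 2),
      (if goodB nums (k + 1) = true then (k : Int) + 1 else 0) =
        (if goodA nums ((k : Int) + 1) (k + 1) = true then (k : Int) + 1 else 0) := by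
    intro k hk
    rw [List.mem_range] at hk
    have hgm : tallyT nums tstM (k + 1) (nums.length / 2) = tallyC nums tstM ((k + 1 : Nat) : Int) (k + 1) :=
      tallyT_eq_tallyC nums tstM (k + 1) (k + 1) (nums.length / 2) (fun t => by omega) (by omega)
    have hgk : tallyT nums tstK (k + 1) (nums.length / 2) = tallyC nums tstK ((k + 1 : Nat) : Int) (k + 1) :=
      tallyT_eq_tallyC nums tstK (k + 1) (k + 1) (nums.length / 2) (fun t => by omega) (by omega)
    have : goodB nums (k + 1) = goodA nums ((k : Int) + 1) (k + 1) := by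
      rw [goodB, goodA, hgm, hgk]
      norm_cast
    rw [this]
  have hback : ∀ k ∈ List.range (nums.length / 2),
      (if goodB nums (nums.length - nums.length / 2 + (nums.length / 2 - 1 - k)) = true
          then ((nums.length - nums.length / 2 + (nums.length / 2 - 1 - k) : Nat) : Int) else 0) =
        (if goodA nums ((nums.length : Int) - 1 - (k : Int)) (k + 1) = true
          then (nums.length : Int) - 1 - (k : Int) else 0) := by
    intro k hk
    rw [List.mem_range] at hk
    have hidx : nums.length - nums.length / 2 + (nums.length / 2 - 1 - k) = nums.length - 1 - k := by
      omega
    have hcast : ((nums.length - 1 - k : Nat) : Int) = (nums.length : Int) - 1 - (k : Int) := by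
      omega
    have hgm : tallyT nums tstM (nums.length - 1 - k) (nums.length / 2) =
        tallyC nums tstM ((nums.length - 1 - k : Nat) : Int) (k + 1) :=
      tallyT_eq_tallyC nums tstM (nums.length - 1 - k) (k + 1) (nums.length / 2) (fun t => by omega) (by omega)
    have hgk : tallyT nums tstK (nums.length - 1 - k) (nums.length / 2) =
        tallyC nums tstK ((nums.length - 1 - k : Nat) : Int) (k + 1) :=
      tallyT_eq_tallyC nums tstK (nums.length - 1 - k) (k + 1) (nums.length / 2) (fun t => by omega) (by omega)
    have : goodB nums (nums.length - 1 - k) = goodA nums ((nums.length : Int) - 1 - (k : Int)) (k + 1) := by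
      rw [goodB, goodA, hgm, hgk, hcast]
    rw [hidx, this, hcast]
  rw [List.map_congr_left hfront, sum_range_reflect_int (nums.length / 2)
    (fun k => if goodB nums (nums.length - nums.length / 2 + k) = true
      then ((nums.length - nums.length / 2 + k : Nat) : Int) else 0),
    List.map_congr_left hback]
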